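-- pv_equiv track=rewrite | github.com/aryan-marthak/Media-Search | backend/services/vocabulary.py | normalize_scene
-- ===== SOURCE A (Python) =====
-- from typing import Dict, List, Optional
--
-- SCENE_SYNONYMS = {
--     "street": ["road", "sidewalk", "pavement", "avenue"],
--     "indoor": ["inside", "interior", "room", "indoors"],
--     "outdoor": ["outside", "exterior", "outdoors"],
--     "beach": ["shore", "seaside", "coast"],
--     "park": ["garden", "green space", "lawn"],
--     "city": ["urban", "downtown", "metropolitan"],
-- }
--
-- def normalize_scene(scene: str) -> Optional[str]:
--     """Normalize scene type to canonical form."""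
--     if not scene:
--         return None
--
--     scene_lower = scene.lower().strip()
--
--     for canonical, synonyms in SCENE_SYNONYMS.items():
--         if scene_lower == canonical or scene_lower in synonyms:
--             return canonical
--
--     return scene_lower
-- ===== SOURCE B (Python) =====
-- from typing import Dict, List, Optional
--
-- SCENE_SYNONYMS = {
--     "street": ["road", "sidewalk", "pavement", "avenue"],
--     "indoor": ["inside", "interior", "room", "indoors"],
--     "outdoor": ["outside", "exterior", "outdoors"],
--     "beach": ["shore", "seaside", "coast"],
--     "park": ["garden", "green space", "lawn"],
--     "city": ["urban", "downtown", "metropolitan"],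
-- }
--
-- # Reverse index built once: canonical -> itself, each synonym -> its canonical.
-- _SCENE_CANONICAL: Dict[str, str] = {}
-- for _canonical, _synonyms in SCENE_SYNONYMS.items():
--     _SCENE_CANONICAL[_canonical] = _canonical
--     for _s in _synonyms:
--         _SCENE_CANONICAL[_s] = _canonical
--
-- def normalize_scene(scene: str) -> Optional[str]:
--     """Normalize scene type to canonical form."""
--     if not scene:
--         return None
--     scene_lower = scene.lower().strip()
--     return _SCENE_CANONICAL.get(scene_lower, scene_lower)
-- ===== Notes on version B (the rewrite author's own statement) =====
-- stated objective: idiomatic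
-- what changed: Replaces the per-call scan over SCENE_SYNONYMS entries (equality-or-membership test per entry) with a reverse dictionary built once at module load and a single .get lookup with scene_lower as default.
import Mathlib
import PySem

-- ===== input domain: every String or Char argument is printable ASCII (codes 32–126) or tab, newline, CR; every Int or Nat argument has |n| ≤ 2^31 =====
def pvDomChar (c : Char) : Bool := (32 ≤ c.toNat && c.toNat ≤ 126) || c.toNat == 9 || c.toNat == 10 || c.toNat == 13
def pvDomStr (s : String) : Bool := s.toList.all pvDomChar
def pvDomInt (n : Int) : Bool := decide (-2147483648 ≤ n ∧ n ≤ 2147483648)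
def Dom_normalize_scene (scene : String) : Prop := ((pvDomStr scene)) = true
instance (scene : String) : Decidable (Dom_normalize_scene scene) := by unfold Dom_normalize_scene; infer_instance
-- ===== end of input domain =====

-- B replaces A's per-call scan over SCENE_SYNONYMS with a reverse dictionary built once and a single default lookup (idiomatic).

-- ===== PORT A =====
def sceneSynonyms : List (String × List String) :=
  [("street", ["road", "sidewalk", "pavement", "avenue"]),
   ("indoor", ["inside", "interior", "room", "indoors"]),
   ("outdoor", ["outside", "exterior", "outdoors"]),
   ("beach", ["shore", "seaside", "coast"]),
   ("park", ["garden", "green space", "lawn"]),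
   ("city", ["urban", "downtown", "metropolitan"])]

-- the for-loop over SCENE_SYNONYMS.items() with its early return
def nsLoop (sl : String) : List (String × List String) → Option String
  | [] => none
  | (canonical, synonyms) :: rest =>
      if sl == canonical || synonyms.contains sl then some canonical else nsLoop sl rest

def normalize_scene (scene : String) : Option String :=
  if scene == "" then none
  else
    let scene_lower := PySem.Str.strip (PySem.Str.lower scene)
    match nsLoop scene_lower sceneSynonyms with
    | some c => some c
    | none => some scene_lower

-- ===== PORT B =====
-- module-load loop building the reverse index _SCENE_CANONICAL
def sceneCanonical : PySem.Dict String String :=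
  sceneSynonyms.foldl
    (fun d p => p.2.foldl (fun d s => d.insert s p.1) (d.insert p.1 p.1))
    PySem.Dict.empty

def normalize_scene_alt (scene : String) : Option String :=
  if scene == "" then none
  else
    let scene_lower := PySem.Str.strip (PySem.Str.lower scene)
    some (sceneCanonical.getD scene_lower scene_lower)

-- ===== PRECONDITION & SPEC =====
def Spec_normalize_scene (scene : String) (out : Option String) : Prop := out = normalize_scene_alt scene
instance (scene : String) (out : Option String) : Decidable (Spec_normalize_scene scene out) := by unfold Spec_normalize_scene; infer_instance

-- ===== CLAIM (what is proved, stated in full; the proofs are below) =====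
def Claim_equal_normalize_scene : Prop := ∀ (scene : String), Dom_normalize_scene scene → Spec_normalize_scene scene (normalize_scene scene)

-- ===== LEMMAS AND PROOFS =====
-- the module-load fold evaluates to this literal reverse table
theorem sceneCanonical_eq : sceneCanonical = PySem.Dict.mk
    [("street", "street"), ("road", "street"), ("sidewalk", "street"), ("pavement", "street"), ("avenue", "street"),
     ("indoor", "indoor"), ("inside", "indoor"), ("interior", "indoor"), ("room", "indoor"), ("indoors", "indoor"),
     ("outdoor", "outdoor"), ("outside", "outdoor"), ("exterior", "outdoor"), ("outdoors", "outdoor"),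
     ("beach", "beach"), ("shore", "beach"), ("seaside", "beach"), ("coast", "beach"),
     ("park", "park"), ("garden", "park"), ("green space", "park"), ("lawn", "park"),
     ("city", "city"), ("urban", "city"), ("downtown", "city"), ("metropolitan", "city")] := by
  decide

set_option maxHeartbeats 2000000 in
-- the scan and the reverse-dict lookup agree on every string
theorem nsLoop_eq_lookup (sl : String) :
    (match nsLoop sl sceneSynonyms with
     | some c => some c
     | none => some sl) = some (sceneCanonical.getD sl sl) := by
  rw [sceneCanonical_eq]
  simp only [sceneSynonyms, nsLoop, Bool.or_eq_true, beq_iff_eq, List.contains_iff_mem]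
  split_ifs with h1 h2 h3 h4 h5 h6
  · rcases h1 with rfl | h; · decide
    fin_cases h <;> decide
  · rcases h2 with rfl | h; · decide
    fin_cases h <;> decide
  · rcases h3 with rfl | h; · decide
    fin_cases h <;> decide
  · rcases h4 with rfl | h; · decide
    fin_cases h <;> decide
  · rcases h5 with rfl | h; · decide
    fin_cases h <;> decide
  · rcases h6 with rfl | h; · decide
    fin_cases h <;> decide
  · rw [not_or] at h1 h2 h3 h4 h5 h6
    simp only [List.mem_cons, List.not_mem_nil, or_false, not_or] at h1 h2 h3 h4 h5 h6
    obtain ⟨n1, n2, n3, n4, n5⟩ := h1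
    obtain ⟨m1, m2, m3, m4, m5⟩ := h2
    obtain ⟨o1, o2, o3, o4⟩ := h3
    obtain ⟨b1, b2, b3, b4⟩ := h4
    obtain ⟨p1, p2, p3, p4⟩ := h5
    obtain ⟨c1, c2, c3, c4⟩ := h6
    simp only [PySem.Dict.getD, PySem.Dict.get?_mk_cons, beq_iff_eq]
    simp [Ne.symm n1, Ne.symm n2, Ne.symm n3, Ne.symm n4, Ne.symm n5,
          Ne.symm m1, Ne.symm m2, Ne.symm m3, Ne.symm m4, Ne.symm m5,
          Ne.symm o1, Ne.symm o2, Ne.symm o3, Ne.symm o4,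
          Ne.symm b1, Ne.symm b2, Ne.symm b3, Ne.symm b4,
          Ne.symm p1, Ne.symm p2, Ne.symm p3, Ne.symm p4,
          Ne.symm c1, Ne.symm c2, Ne.symm c3, Ne.symm c4]
    simp [PySem.Dict.get?]

-- ===== VERDICT (by name: the statement is the Claim_ definition above) =====
set_option maxHeartbeats 2000000 in
theorem normalize_scene_spec : Claim_equal_normalize_scene := by
  intro scene _
  unfold Spec_normalize_scene normalize_scene normalize_scene_alt
  by_cases h : scene == ""
  · simp only [h, if_true]
  · simp only [h, Bool.false_eq_true, if_false]
    exact nsLoop_eq_lookup _
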